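-- pv_equiv track=rewrite | github.com/steklon/test_dev | data_collections.py | super_names
-- ===== SOURCE A (Python) =====
-- def super_names(mentors_lists, courses_list):
--
--     mentors_names = []
--
--     for m in mentors_lists:
--         course_names = []
--         for name in m:
--             course_names.append(name.split()[0])
--         mentors_names.append(course_names)
--
--     pairs = []
--
--     result = str()
--
--     for id1 in range(len(mentors_names)):
--         for id2 in range(len(mentors_names)):
--             if id1 == id2:
--                 continue
--
--             intersection_set = set(mentors_names[id1]).intersection(set(mentors_names[id2]))
--
--             if len(intersection_set) > 0:
--                 pair = {courses_list[id1], courses_list[id2]}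
--                 if pair not in pairs:
--                     pairs.append(pair)
--                     all_names_sorted = sorted(intersection_set)
--                     result += (f"На курсах '{courses_list[id1]}' "
--                                f"и '{courses_list[id2]}' преподают: "
--                                f"{', '.join(all_names_sorted)}\n")
--
--     return result.strip()
-- ===== SOURCE B (Python) =====
-- def super_names(mentors_lists, courses_list):
--     firsts = [[name.split()[0] for name in m] for m in mentors_lists]
--
--     # inverted index: first name -> increasing list of course indices teaching it
--     index = {}
--     for i, names in enumerate(firsts):
--         for nm in dict.fromkeys(names):
--             index.setdefault(nm, []).append(i)
--
--     # shared[(i, j)] (i < j) = first names taught by both course i and course j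
--     shared = {}
--     for nm, idxs in index.items():
--         for a, x in enumerate(idxs):
--             for y in idxs[a + 1:]:
--                 shared.setdefault((x, y), []).append(nm)
--
--     lines = []
--     seen = []
--     n = len(firsts)
--     for i in range(n):
--         for j in range(i + 1, n):
--             names = shared.get((i, j))
--             if names:
--                 pair = {courses_list[i], courses_list[j]}
--                 if pair not in seen:
--                     seen.append(pair)
--                     lines.append(f"На курсах '{courses_list[i]}' и '{courses_list[j]}' преподают: "
--                                  + ", ".join(sorted(names)))
--     return "\n".join(lines)
-- ===== Notes on version B (the rewrite author's own statement) =====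
-- stated objective: faster
-- what changed: A intersects the two courses' first-name sets from scratch for every ordered course pair; B builds an inverted index (first name -> courses) once, turns it into a shared-names table keyed by course pairs, and then walks only the i<j pairs with a dictionary lookup, joining the collected lines at the end instead of accumulating and stripping a string.
import Mathlib
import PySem

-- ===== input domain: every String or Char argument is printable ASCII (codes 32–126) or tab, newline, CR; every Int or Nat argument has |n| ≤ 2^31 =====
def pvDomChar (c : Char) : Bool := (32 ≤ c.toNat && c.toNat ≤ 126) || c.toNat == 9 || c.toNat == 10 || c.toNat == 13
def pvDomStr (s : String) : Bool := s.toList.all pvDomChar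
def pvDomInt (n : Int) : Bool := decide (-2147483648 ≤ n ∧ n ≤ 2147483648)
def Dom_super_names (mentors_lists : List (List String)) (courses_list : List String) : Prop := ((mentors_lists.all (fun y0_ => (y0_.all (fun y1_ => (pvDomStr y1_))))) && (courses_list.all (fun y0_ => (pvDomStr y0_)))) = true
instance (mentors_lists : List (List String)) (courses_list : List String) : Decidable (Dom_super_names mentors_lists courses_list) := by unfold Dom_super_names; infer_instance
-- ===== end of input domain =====

-- B replaces A's per-pair set intersections by an inverted index (first name → courses) from which a
-- shared-names table keyed by course pairs is built once; equivalence is about the return value only.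

-- ===== PORT A =====
-- name.split()[0] is ported as (split₀ name).headD "" : exact under Pre_ (split nonempty; Python raises IndexError otherwise).
-- courses_list[id] is ported as pyGetD : exact under Pre_ (index in range whenever this line is reached).
def super_names (mentors_lists : List (List String)) (courses_list : List String) : String :=
  let mentors_names : List (List String) :=
    mentors_lists.foldl (fun acc m =>
      acc ++ [m.foldl (fun course_names name => course_names ++ [(PySem.Str.split₀ name).headD ""]) []]) []
  let st : List (PySem.Set String) × String :=
    (PySem.List.pyRange 0 (mentors_names.length : Int) 1).foldl (fun st id1 =>
      (PySem.List.pyRange 0 (mentors_names.length : Int) 1).foldl (fun st id2 =>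
        if id1 == id2 then st
        else
          let intersection_set : PySem.Set String :=
            PySem.Set.inter (PySem.Set.ofList (PySem.List.pyGetD mentors_names id1 []))
              (PySem.Set.ofList (PySem.List.pyGetD mentors_names id2 []))
          if 0 < PySem.Set.len intersection_set then
            let pair : PySem.Set String :=
              PySem.Set.ofList [PySem.List.pyGetD courses_list id1 "", PySem.List.pyGetD courses_list id2 ""]
            -- 'pair not in pairs' : list membership via set equality
            if st.1.any (fun q => PySem.Set.equal q pair) then st
            else (st.1 ++ [pair],
              st.2 ++ "На курсах '" ++ PySem.List.pyGetD courses_list id1 "" ++ "' и '"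
                ++ PySem.List.pyGetD courses_list id2 "" ++ "' преподают: "
                ++ PySem.Str.join ", " (PySem.List.sorted intersection_set (fun x => x) false) ++ "\n")
          else st) st)
      (([] : List (PySem.Set String)), "")
  PySem.Str.strip st.2

-- ===== PORT B =====
def super_names_alt (mentors_lists : List (List String)) (courses_list : List String) : String :=
  let firsts : List (List String) :=
    mentors_lists.map (fun m => m.map (fun name => (PySem.Str.split₀ name).headD ""))
  let index : PySem.Dict String (List Int) :=
    (PySem.List.enumerate firsts).foldl (fun index p =>
      (PySem.List.dedup p.2).foldl (fun index nm => index.modify nm [] (fun l => l ++ [p.1])) index)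
      PySem.Dict.empty
  let shared : PySem.Dict (Int × Int) (List String) :=
    index.items.foldl (fun shared q =>
      (PySem.List.enumerate q.2).foldl (fun shared ax =>
        (PySem.List.slice q.2 (some (ax.1 + 1)) none).foldl (fun shared y =>
          shared.modify (ax.2, y) [] (fun l => l ++ [q.1])) shared) shared)
      PySem.Dict.empty
  let st : List (PySem.Set String) × List String :=
    (PySem.List.pyRange 0 (firsts.length : Int) 1).foldl (fun st i =>
      (PySem.List.pyRange (i + 1) (firsts.length : Int) 1).foldl (fun st j =>
        -- shared.get((i, j)) : None and [] are both falsy, so getD (i, j) [] is exact here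
        let names := shared.getD (i, j) []
        if names.isEmpty then st
        else
          let pair : PySem.Set String :=
            PySem.Set.ofList [PySem.List.pyGetD courses_list i "", PySem.List.pyGetD courses_list j ""]
          if st.1.any (fun q => PySem.Set.equal q pair) then st
          else (st.1 ++ [pair],
            st.2 ++ ["На курсах '" ++ PySem.List.pyGetD courses_list i "" ++ "' и '"
              ++ PySem.List.pyGetD courses_list j "" ++ "' преподают: "
              ++ PySem.Str.join ", " (PySem.List.sorted names (fun x => x) false)])) st)
      (([] : List (PySem.Set String)), ([] : List String))
  PySem.Str.join "\n" st.2

-- ===== PRECONDITION & SPEC =====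
-- the first-name table both programs derive from the input (used by Pre_ and by the proofs)
def pvFirsts (mentors_lists : List (List String)) : List (List String) :=
  mentors_lists.map (fun m => m.map (fun name => (PySem.Str.split₀ name).headD ""))

-- Pre_ excludes exactly the inputs on which Python A raises: a mentor name that is empty/whitespace-only
-- (IndexError on name.split()[0]), and a course pair with a shared first name whose index is out of range
-- of courses_list (IndexError on courses_list[id]).
def Pre_super_names (mentors_lists : List (List String)) (courses_list : List String) : Prop :=
  (∀ m ∈ mentors_lists, ∀ name ∈ m, PySem.Str.split₀ name ≠ []) ∧
  (∀ j, j < mentors_lists.length → ∀ i, i < j →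
    (∃ nm, nm ∈ (pvFirsts mentors_lists).getD i [] ∧ nm ∈ (pvFirsts mentors_lists).getD j []) →
    j < courses_list.length)
instance (mentors_lists : List (List String)) (courses_list : List String) : Decidable (Pre_super_names mentors_lists courses_list) := by unfold Pre_super_names; infer_instance

def pvWitness_super_names : List (List String) × List String :=
  ([["Ivan Petrov", "Anna A"], ["Anna K", "Bob M"]], ["Python", "Golang"])

def Spec_super_names (mentors_lists : List (List String)) (courses_list : List String) (out : String) : Prop := out = super_names_alt mentors_lists courses_list
instance (mentors_lists : List (List String)) (courses_list : List String) (out : String) : Decidable (Spec_super_names mentors_lists courses_list out) := by unfold Spec_super_names; infer_instance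

-- ===== CLAIM (what is proved, stated in full; the proofs are below) =====
def Claim_equal_super_names : Prop := ∀ (mentors_lists : List (List String)) (courses_list : List String), Dom_super_names mentors_lists courses_list → Pre_super_names mentors_lists courses_list → Spec_super_names mentors_lists courses_list (super_names mentors_lists courses_list)

-- ===== LEMMAS AND PROOFS =====

-- proof-only abbreviations
def pvC (cl : List String) (k : Int) : String := PySem.List.pyGetD cl k ""
def pvInter (F : List (List String)) (p : Int × Int) : List String :=
  PySem.Set.inter (PySem.Set.ofList (PySem.List.pyGetD F p.1 []))
    (PySem.Set.ofList (PySem.List.pyGetD F p.2 []))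
def pvPairSet (cl : List String) (p : Int × Int) : PySem.Set String :=
  PySem.Set.ofList [pvC cl p.1, pvC cl p.2]
def pvSeen (ps : List (PySem.Set String)) (s : PySem.Set String) : Bool :=
  ps.any (fun q => PySem.Set.equal q s)
def pvLine (cl : List String) (F : List (List String)) (p : Int × Int) : String :=
  "На курсах '" ++ pvC cl p.1 ++ "' и '" ++ pvC cl p.2 ++ "' преподают: "
    ++ PySem.Str.join ", " (PySem.List.sorted (pvInter F p) (fun x => x) false)
def pvStepS (cl : List String) (F : List (List String))
    (st : List (PySem.Set String) × String) (p : Int × Int) : List (PySem.Set String) × String :=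
  if pvSeen st.1 (pvPairSet cl p) then st
  else (st.1 ++ [pvPairSet cl p], st.2 ++ (pvLine cl F p ++ "\n"))
def pvStepL (cl : List String) (F : List (List String))
    (st : List (PySem.Set String) × List String) (p : Int × Int) : List (PySem.Set String) × List String :=
  if pvSeen st.1 (pvPairSet cl p) then st
  else (st.1 ++ [pvPairSet cl p], st.2 ++ [pvLine cl F p])

def pvIdx (F : List (List String)) (nm : String) : List Int :=
  (PySem.List.pyRange 0 (F.length : Int) 1).filter (fun i => decide (nm ∈ PySem.List.pyGetD F i []))
def pvAllNames (F : List (List String)) : List String :=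
  PySem.Set.ofList (F.flatMap PySem.List.dedup)
def pairs2 : List Int → List (Int × Int)
  | [] => []
  | x :: t => t.map (fun y => (x, y)) ++ pairs2 t
def pvSharedB (F : List (List String)) (p : Int × Int) : List String :=
  (pvAllNames F).filter (fun nm => decide (p ∈ pairs2 (pvIdx F nm)))

def pvAllPairs (n : Int) : List (Int × Int) :=
  (PySem.List.pyRange 0 n 1).flatMap (fun i => (PySem.List.pyRange 0 n 1).map (fun j => (i, j)))
def pvLtPairs (n : Int) : List (Int × Int) :=
  (PySem.List.pyRange 0 n 1).flatMap (fun i => (PySem.List.pyRange (i + 1) n 1).map (fun j => (i, j)))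
def pvP (F : List (List String)) : List (Int × Int) :=
  (pvLtPairs (F.length : Int)).filter (fun p => !(pvInter F p).isEmpty)
def pvLexLT (p q : Int × Int) : Prop := p.1 < q.1 ∨ (p.1 = q.1 ∧ p.2 < q.2)

def pvConcatNL : List String → String
  | [] => ""
  | l :: t => l ++ "\n" ++ pvConcatNL t

-- proof-only copies of port B's dictionaries
def pvIndexD (F : List (List String)) : PySem.Dict String (List Int) :=
  (PySem.List.enumerate F).foldl (fun index p =>
    (PySem.List.dedup p.2).foldl (fun index nm => index.modify nm [] (fun l => l ++ [p.1])) index)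
    PySem.Dict.empty
def pvSharedD (F : List (List String)) : PySem.Dict (Int × Int) (List String) :=
  (pvIndexD F).items.foldl (fun shared q =>
    (PySem.List.enumerate q.2).foldl (fun shared ax =>
      (PySem.List.slice q.2 (some (ax.1 + 1)) none).foldl (fun shared y =>
        shared.modify (ax.2, y) [] (fun l => l ++ [q.1])) shared) shared)
    PySem.Dict.empty
def pvPairsOf (l : List Int) : List (Int × Int) :=
  (PySem.List.enumerate l).flatMap (fun ax =>
    (PySem.List.slice l (some (ax.1 + 1)) none).map (fun y => (ax.2, y)))


lemma pvFoldPairs {γ : Type} (is : List Int) (js : Int → List Int) (g : γ → Int × Int → γ) (init : γ) :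
    (is.flatMap (fun i => (js i).map (fun j => (i, j)))).foldl g init
      = is.foldl (fun st i => (js i).foldl (fun st j => g st (i, j)) st) init := by
  simp [List.foldl_flatMap, List.foldl_map]

lemma pvA_flat (mls : List (List String)) (cl : List String) :
    super_names mls cl = PySem.Str.strip
      (((pvAllPairs ((pvFirsts mls).length : Int)).foldl
          (fun st p =>
            if p.1 == p.2 then st
            else if 0 < PySem.Set.len (pvInter (pvFirsts mls) p) then
              (if pvSeen st.1 (pvPairSet cl p) then st
               else (st.1 ++ [pvPairSet cl p], st.2 ++ (pvLine cl (pvFirsts mls) p ++ "\n")))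
            else st)
          (([] : List (PySem.Set String)), "")).2) := by
  unfold super_names
  simp only [PySem.List.foldl_append_singleton_eq_map, List.nil_append]
  have hF : List.map (List.map fun x => (PySem.Str.split₀ x).headD "") mls = pvFirsts mls := rfl
  rw [hF]
  conv_rhs => rw [pvAllPairs, pvFoldPairs]
  refine congrArg _ (congrArg Prod.snd (PySem.List.foldl_congr_mem _ _ _ _ ?_))
  intro st id1 _
  refine PySem.List.foldl_congr_mem _ _ _ _ ?_
  intro acc id2 _
  simp only [pvInter, pvSeen, pvPairSet, pvLine, pvC]
  split_ifs <;> simp_all [String.append_assoc]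

lemma pvB_flat (mls : List (List String)) (cl : List String) :
    super_names_alt mls cl = PySem.Str.join "\n"
      (((pvLtPairs ((pvFirsts mls).length : Int)).foldl
          (fun st p =>
            if ((pvSharedD (pvFirsts mls)).getD p []).isEmpty then st
            else
              (if pvSeen st.1 (pvPairSet cl p) then st
               else (st.1 ++ [pvPairSet cl p],
                 st.2 ++ ["На курсах '" ++ pvC cl p.1 ++ "' и '" ++ pvC cl p.2 ++ "' преподают: "
                   ++ PySem.Str.join ", " (PySem.List.sorted ((pvSharedD (pvFirsts mls)).getD p []) (fun x => x) false)])))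
          (([] : List (PySem.Set String)), ([] : List String))).2) := by
  conv_rhs => rw [pvLtPairs, pvFoldPairs]
  rfl


lemma pvA_fold (mls : List (List String)) (cl : List String) :
    super_names mls cl = PySem.Str.strip
      ((((pvAllPairs ((pvFirsts mls).length : Int)).filter
           (fun p => (!(p.1 == p.2)) && !(pvInter (pvFirsts mls) p).isEmpty)).foldl
          (pvStepS cl (pvFirsts mls)) (([] : List (PySem.Set String)), "")).2) := by
  rw [pvA_flat]
  rw [← PySem.List.foldl_if_eq_foldl_filter
    (fun p => (!(p.1 == p.2)) && !(pvInter (pvFirsts mls) p).isEmpty)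
    (pvStepS cl (pvFirsts mls))]
  refine congrArg _ (congrArg Prod.snd (PySem.List.foldl_congr_mem _ _ _ _ ?_))
  intro st p _
  by_cases h1 : (p.1 == p.2) = true
  · simp [h1]
  · by_cases h2 : (pvInter (pvFirsts mls) p).isEmpty = true
    · rw [List.isEmpty_iff] at h2
      simp [h1, h2, PySem.Set.len]
    · have h2' : pvInter (pvFirsts mls) p ≠ [] := by simpa using h2
      have hlen : 0 < (pvInter (pvFirsts mls) p).length := by
        cases hI : pvInter (pvFirsts mls) p with
        | nil => exact absurd hI h2'
        | cons a t => simp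
      simp [h1, h2, pvStepS, PySem.Set.len, hlen]

lemma pvSeen_mono (ps l : List (PySem.Set String)) (s : PySem.Set String)
    (h : pvSeen ps s = true) : pvSeen (ps ++ l) s = true := by
  simp only [pvSeen, List.any_append, Bool.or_eq_true]
  exact Or.inl h

lemma pvSeen_swap (cl : List String) (ps : List (PySem.Set String)) (a b : Int)
    (h : pvSeen ps (pvPairSet cl (a, b)) = true) : pvSeen ps (pvPairSet cl (b, a)) = true := by
  simp only [pvSeen, List.any_eq_true] at h ⊢
  obtain ⟨q, hq, he⟩ := h
  refine ⟨q, hq, ?_⟩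
  rw [PySem.Set.equal_iff] at he ⊢
  intro x
  rw [he x]
  simp only [pvPairSet, PySem.Set.mem_ofList, List.mem_cons]
  tauto

lemma pvSeen_step_self (cl : List String) (F : List (List String))
    (st : List (PySem.Set String) × String) (q : Int × Int) :
    pvSeen (pvStepS cl F st q).1 (pvPairSet cl q) = true := by
  unfold pvStepS
  split_ifs with h
  · exact h
  · simp only [pvSeen, List.any_append, Bool.or_eq_true, List.any_cons, List.any_nil]
    right; left
    rw [PySem.Set.equal_iff]
    intro x; rfl

lemma pvStepS_fst (cl : List String) (F : List (List String))
    (st : List (PySem.Set String) × String) (q : Int × Int) :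
    (pvStepS cl F st q).1 = st.1 ∨ (pvStepS cl F st q).1 = st.1 ++ [pvPairSet cl q] := by
  unfold pvStepS; split_ifs <;> simp

lemma pvDropMirrors (cl : List String) (F : List (List String)) :
    ∀ (L : List (Int × Int)) (st : List (PySem.Set String) × String),
      (∀ p ∈ L, p.1 ≠ p.2) →
      (∀ l1 p l2, L = l1 ++ p :: l2 → p.2 < p.1 →
        pvSeen st.1 (pvPairSet cl p) = true ∨ (p.2, p.1) ∈ l1) →
      L.foldl (pvStepS cl F) st = (L.filter (fun p => decide (p.1 < p.2))).foldl (pvStepS cl F) st := by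
  intro L
  induction L with
  | nil => intro st _ _; rfl
  | cons q L' ih =>
    intro st hne hmir
    by_cases hlt : q.1 < q.2
    · have hfil : (q :: L').filter (fun p => decide (p.1 < p.2))
          = q :: L'.filter (fun p => decide (p.1 < p.2)) := by
        simp [hlt]
      rw [hfil, List.foldl_cons, List.foldl_cons]
      apply ih
      · intro p hp; exact hne p (List.mem_cons_of_mem q hp)
      · intro l1 p l2 hL hplt
        rcases hmir (q :: l1) p l2 (by rw [hL]; rfl) hplt with h | h
        · left
          rcases pvStepS_fst cl F st q with he | he <;> rw [he]
          · exact h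
          · exact pvSeen_mono _ _ _ h
        · rcases List.mem_cons.mp h with he | he
          · left
            have h1 : p.1 = q.2 := by
              have := congrArg Prod.snd he; simpa using this
            have h2 : p.2 = q.1 := by
              have := congrArg Prod.fst he; simpa using this
            have hs := pvSeen_step_self cl F st q
            have hs' := pvSeen_swap cl _ q.1 q.2 hs
            have hp : pvPairSet cl p = pvPairSet cl (q.2, q.1) := by
              rw [show p = (p.1, p.2) from rfl, h1, h2]
            rw [hp]
            exact hs'
          · right; exact he
    · have hneq := hne q (List.mem_cons_self)
      have hgt : q.2 < q.1 := by omega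
      rcases hmir [] q L' rfl hgt with h | h
      · have hstep : pvStepS cl F st q = st := by
          unfold pvStepS; rw [if_pos h]
        have hfil : (q :: L').filter (fun p => decide (p.1 < p.2))
            = L'.filter (fun p => decide (p.1 < p.2)) := by
          simp [hlt]
        rw [hfil, List.foldl_cons, hstep]
        apply ih
        · intro p hp; exact hne p (List.mem_cons_of_mem q hp)
        · intro l1 p l2 hL hplt
          rcases hmir (q :: l1) p l2 (by rw [hL]; rfl) hplt with h' | h'
          · exact Or.inl h'
          · rcases List.mem_cons.mp h' with he | he
            · exfalso
              have h2 : p.2 = q.1 := by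
                have := congrArg Prod.fst he; simpa using this
              have h1 : p.1 = q.2 := by
                have := congrArg Prod.snd he; simpa using this
              omega
            · exact Or.inr he
      · exact absurd h (List.not_mem_nil)

lemma pvFoldL_shift (cl : List String) (F : List (List String)) :
    ∀ (P : List (Int × Int)) (ps : List (PySem.Set String)) (ls : List String),
      P.foldl (pvStepL cl F) (ps, ls)
        = ((P.foldl (pvStepL cl F) (ps, [])).1, ls ++ (P.foldl (pvStepL cl F) (ps, [])).2) := by
  intro P
  induction P with
  | nil => intro ps ls; simp
  | cons q P' ih =>
    intro ps ls
    by_cases h : pvSeen ps (pvPairSet cl q) = true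
    · have h1 : pvStepL cl F (ps, ls) q = (ps, ls) := by simp [pvStepL, h]
      have h2 : pvStepL cl F (ps, []) q = (ps, ([] : List String)) := by simp [pvStepL, h]
      rw [List.foldl_cons, List.foldl_cons, h1, h2]
      exact ih ps ls
    · have h1 : pvStepL cl F (ps, ls) q = (ps ++ [pvPairSet cl q], ls ++ [pvLine cl F q]) := by
        simp [pvStepL, h]
      have h2 : pvStepL cl F (ps, []) q = (ps ++ [pvPairSet cl q], [pvLine cl F q]) := by
        simp [pvStepL, h]
      rw [List.foldl_cons, List.foldl_cons, h1, h2,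
          ih (ps ++ [pvPairSet cl q]) (ls ++ [pvLine cl F q]),
          ih (ps ++ [pvPairSet cl q]) [pvLine cl F q]]
      simp

lemma pvFoldS_eq (cl : List String) (F : List (List String)) :
    ∀ (P : List (Int × Int)) (ps : List (PySem.Set String)) (s : String),
      P.foldl (pvStepS cl F) (ps, s)
        = ((P.foldl (pvStepL cl F) (ps, [])).1,
           s ++ pvConcatNL ((P.foldl (pvStepL cl F) (ps, [])).2)) := by
  intro P
  induction P with
  | nil =>
    intro ps s
    show (ps, s) = (ps, s ++ pvConcatNL [])
    have h0 : s ++ pvConcatNL [] = s := String.append_empty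
    rw [h0]
  | cons q P' ih =>
    intro ps s
    by_cases h : pvSeen ps (pvPairSet cl q) = true
    · have h1 : pvStepS cl F (ps, s) q = (ps, s) := by simp [pvStepS, h]
      have h2 : pvStepL cl F (ps, []) q = (ps, ([] : List String)) := by simp [pvStepL, h]
      rw [List.foldl_cons, List.foldl_cons, h1, h2]
      exact ih ps s
    · have h1 : pvStepS cl F (ps, s) q = (ps ++ [pvPairSet cl q], s ++ (pvLine cl F q ++ "\n")) := by
        simp [pvStepS, h]
      have h2 : pvStepL cl F (ps, []) q = (ps ++ [pvPairSet cl q], [pvLine cl F q]) := by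
        simp [pvStepL, h]
      rw [List.foldl_cons, List.foldl_cons, h1, h2,
          ih (ps ++ [pvPairSet cl q]) (s ++ (pvLine cl F q ++ "\n")),
          pvFoldL_shift cl F P' (ps ++ [pvPairSet cl q]) [pvLine cl F q]]
      have hc : pvConcatNL (pvLine cl F q :: (P'.foldl (pvStepL cl F) (ps ++ [pvPairSet cl q], [])).2)
          = pvLine cl F q ++ "\n" ++ pvConcatNL ((P'.foldl (pvStepL cl F) (ps ++ [pvPairSet cl q], [])).2) := rfl
      simp only [List.singleton_append, hc]
      simp [String.append_assoc]

lemma pvMem_foldL (cl : List String) (F : List (List String)) :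
    ∀ (P : List (Int × Int)) (ps : List (PySem.Set String)) (ls : List String) (l : String),
      l ∈ (P.foldl (pvStepL cl F) (ps, ls)).2 → l ∈ ls ∨ ∃ p ∈ P, l = pvLine cl F p := by
  intro P
  induction P with
  | nil => intro ps ls l h; exact Or.inl h
  | cons q P' ih =>
    intro ps ls l h
    rw [List.foldl_cons] at h
    unfold pvStepL at h
    split_ifs at h with hs
    · rcases ih ps ls l h with h' | ⟨p, hp, he⟩
      · exact Or.inl h'
      · exact Or.inr ⟨p, List.mem_cons_of_mem q hp, he⟩
    · rcases ih _ _ l h with h' | ⟨p, hp, he⟩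
      · rcases List.mem_append.mp h' with h'' | h''
        · exact Or.inl h''
        · exact Or.inr ⟨q, List.mem_cons_self, by simpa using h''⟩
      · exact Or.inr ⟨p, List.mem_cons_of_mem q hp, he⟩


lemma pvFlatMapIf {α : Type} (l : List α) (P : α → Prop) [DecidablePred P] :
    l.flatMap (fun x => if P x then [x] else []) = l.filter (fun x => decide (P x)) := by
  induction l with
  | nil => rfl
  | cons a t ih =>
    rw [List.flatMap_cons, List.filter_cons, ih]
    by_cases h : P a
    · simp [h]
    · simp [h]

lemma pvFlatMapIfMap {α β : Type} (l : List (β × α)) (P : α → Prop) [DecidablePred P] :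
    l.flatMap (fun p => if P p.2 then [p.1] else [])
      = (l.filter (fun p => decide (P p.2))).map (fun p => p.1) := by
  induction l with
  | nil => rfl
  | cons a t ih =>
    rw [List.flatMap_cons, List.filter_cons, ih]
    by_cases h : P a.2
    · simp [h]
    · simp [h]

lemma pvIndexD_eq (F : List (List String)) :
    pvIndexD F
      = ((PySem.List.enumerate F).flatMap (fun p => (PySem.List.dedup p.2).map (fun nm => (nm, p.1)))).foldl
          (fun d q => d.modify q.1 [] (fun l => l ++ [q.2])) PySem.Dict.empty := by
  unfold pvIndexD
  rw [List.foldl_flatMap]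
  simp [List.foldl_map]

lemma pvFilterSingle (nm : String) (p : Int × List String) :
    ((PySem.List.dedup p.2).map (fun s => (s, p.1))).filter (fun q => q.1 == nm)
      = if nm ∈ p.2 then [(nm, p.1)] else [] := by
  rw [List.filter_map]
  rw [show ((fun q : String × Int => q.1 == nm) ∘ fun s => (s, p.1)) = fun s => s == nm from rfl]
  rw [List.filter_beq]
  by_cases h : nm ∈ p.2
  · rw [List.count_eq_one_of_mem (PySem.List.nodup_dedup p.2) ((PySem.List.mem_dedup p.2 nm).mpr h)]
    simp [h]
  · rw [List.count_eq_zero_of_not_mem (fun hc => h ((PySem.List.mem_dedup p.2 nm).mp hc))]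
    simp [h]

lemma pvIndexD_getD (F : List (List String)) (nm : String) :
    (pvIndexD F).getD nm [] = pvIdx F nm := by
  rw [pvIndexD_eq, PySem.Dict.getD_foldl_modify_append]
  rw [show (PySem.Dict.empty : PySem.Dict String (List Int)).getD nm [] = [] from rfl]
  rw [List.nil_append, List.filter_flatMap]
  rw [List.flatMap_congr (fun p _ => pvFilterSingle nm p)]
  rw [List.map_flatMap]
  have hmap : ∀ p : Int × List String,
      ((if nm ∈ p.2 then [(nm, p.1)] else [] : List (String × Int)).map (fun q => q.2))
        = (if nm ∈ p.2 then [p.1] else []) := by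
    intro p; split_ifs <;> rfl
  rw [List.flatMap_congr (fun p _ => hmap p)]
  rw [pvFlatMapIfMap (PySem.List.enumerate F) (fun l : List String => nm ∈ l)]
  rw [PySem.List.enumerate_eq_map_pyRange F [], List.filter_map, List.map_map]
  rw [show ((fun p : Int × List String => decide (nm ∈ p.2)) ∘ fun j : Int => (j, PySem.List.pyGetD F j []))
        = fun j : Int => decide (nm ∈ PySem.List.pyGetD F j []) from rfl]
  rw [show (Prod.fst ∘ fun j : Int => (j, PySem.List.pyGetD F j [])) = id from rfl, List.map_id]
  rw [show PySem.List.len F = ((F.length : Int)) from by simp [pysem]]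
  rfl

lemma pvIndexD_keys (F : List (List String)) : (pvIndexD F).keys = pvAllNames F := by
  rw [pvIndexD_eq]
  rw [PySem.Dict.keys_foldl_modify_key _ Prod.fst [] (fun _ q => (fun l => l ++ [q.2]))]
  rw [show (PySem.Dict.empty : PySem.Dict String (List Int)).keys = [] from rfl]
  rw [PySem.Set.update_nil_left, List.map_flatMap]
  have h1 : ∀ p : Int × List String,
      ((PySem.List.dedup p.2).map (fun nm => (nm, p.1))).map Prod.fst = PySem.List.dedup p.2 := by
    intro p
    rw [List.map_map, show (Prod.fst ∘ fun nm : String => (nm, p.1)) = id from rfl, List.map_id]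
  rw [List.flatMap_congr (fun p _ => h1 p)]
  rw [PySem.List.enumerate_eq_map_pyRange F [], List.flatMap_map]
  unfold pvAllNames
  rw [← List.flatMap_map (fun j : Int => PySem.List.pyGetD F j []) PySem.List.dedup]
  rw [show PySem.List.len F = ((F.length : Int)) from by simp [pysem]]
  rw [PySem.List.map_pyGetD_pyRange_zero' F []]

lemma pvIndexD_items (F : List (List String)) :
    (pvIndexD F).items = (pvAllNames F).map (fun nm => (nm, pvIdx F nm)) := by
  have hnd : (pvIndexD F).keys.Nodup := by
    rw [pvIndexD_keys]; exact PySem.Set.nodup_ofList _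
  rw [PySem.Dict.items_eq_map_keys _ hnd [], pvIndexD_keys]
  exact List.map_congr_left (fun nm _ => by rw [pvIndexD_getD])

lemma pvEnumShift {α : Type} (xs : List α) : ∀ (s : Int),
    PySem.List.enumerate xs (s + 1) = (PySem.List.enumerate xs s).map (fun p => (p.1 + 1, p.2)) := by
  induction xs with
  | nil => intro s; rfl
  | cons x t ih =>
    intro s
    rw [PySem.List.enumerate_cons, PySem.List.enumerate_cons, List.map_cons, ih (s + 1)]

lemma pvPairsOf_eq_pairs2 : ∀ l : List Int, pvPairsOf l = pairs2 l := by
  intro l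
  induction l with
  | nil => rfl
  | cons z t ih =>
    unfold pvPairsOf
    rw [PySem.List.enumerate_cons, List.flatMap_cons]
    rw [show ((0 : Int), z).1 + 1 = 1 from by norm_num]
    rw [PySem.List.slice_from_one]
    rw [show PySem.List.enumerate t 1 = (PySem.List.enumerate t 0).map (fun p => (p.1 + 1, p.2)) from by
          simpa using pvEnumShift t 0,
        List.flatMap_map]
    show (z :: t).tail.map (fun y => (z, y)) ++ _ = pairs2 (z :: t)
    rw [show (z :: t).tail = t from rfl]
    unfold pairs2
    congr 1
    rw [← ih]
    unfold pvPairsOf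
    apply List.flatMap_congr
    intro p hp
    rw [PySem.List.mem_enumerate_iff] at hp
    obtain ⟨k, hk, hpe⟩ := hp
    have hp1 : 0 ≤ p.1 := by rw [hpe]; simp
    show (PySem.List.slice (z :: t) (some (p.1 + 1 + 1)) none).map (fun y => (p.2, y))
        = (PySem.List.slice t (some (p.1 + 1)) none).map (fun y => (p.2, y))
    rw [PySem.List.slice_from (z :: t) (by omega : (0:Int) ≤ p.1 + 1 + 1),
        PySem.List.slice_from t (by omega : (0:Int) ≤ p.1 + 1)]
    rw [show (p.1 + 1 + 1).toNat = (p.1 + 1).toNat + 1 from by omega]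
    rw [List.drop_succ_cons]

lemma pvMem_pairs2 : ∀ (l : List Int), l.Pairwise (· < ·) → ∀ x y : Int,
    ((x, y) ∈ pairs2 l ↔ x ∈ l ∧ y ∈ l ∧ x < y) := by
  intro l
  induction l with
  | nil => intro _ x y; simp [pairs2]
  | cons z t ih =>
    intro hl x y
    rcases List.pairwise_cons.mp hl with ⟨hz, ht⟩
    simp only [pairs2, List.mem_append, List.mem_map, List.mem_cons]
    constructor
    · rintro (⟨y', hy', he⟩ | h)
      · have h1 : z = x := by have := congrArg Prod.fst he; simpa using this
        have h2 : y' = y := by have := congrArg Prod.snd he; simpa using this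
        exact ⟨Or.inl h1.symm, Or.inr (h2 ▸ hy'), by rw [← h1, ← h2]; exact hz y' hy'⟩
      · obtain ⟨hx, hy, hlt⟩ := (ih ht x y).mp h
        exact ⟨Or.inr hx, Or.inr hy, hlt⟩
    · rintro ⟨hx, hy, hlt⟩
      rcases hx with hx | hx
      · rcases hy with hy | hy
        · exfalso; omega
        · exact Or.inl ⟨y, hy, by rw [hx]⟩
      · rcases hy with hy | hy
        · exfalso; have := hz x hx; omega
        · exact Or.inr ((ih ht x y).mpr ⟨hx, hy, hlt⟩)

lemma pvNodup_pairs2 : ∀ (l : List Int), l.Pairwise (· < ·) → (pairs2 l).Nodup := by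
  intro l
  induction l with
  | nil => intro _; simp [pairs2]
  | cons z t ih =>
    intro hl
    rcases List.pairwise_cons.mp hl with ⟨hz, ht⟩
    show (t.map (fun y => (z, y)) ++ pairs2 t).Nodup
    rw [List.nodup_append]
    refine ⟨?_, ih ht, ?_⟩
    · refine List.Nodup.map ?_ (List.Pairwise.imp (fun h => ne_of_lt h) ht)
      intro a b hab
      simpa using congrArg Prod.snd hab
    · intro a ha b hb heq
      subst heq
      obtain ⟨y', hy', he⟩ := List.mem_map.mp ha
      have hb' : (z, y') ∈ pairs2 t := by rw [he]; exact hb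
      have hzmem := ((pvMem_pairs2 t ht z y').mp hb').1
      have := hz z hzmem
      omega

lemma pvIdx_pairwise (F : List (List String)) (nm : String) : (pvIdx F nm).Pairwise (· < ·) :=
  (PySem.List.pairwise_lt_pyRange_one 0 _).filter _

lemma pvMem_pvIdx (F : List (List String)) (nm : String) (i : Int) :
    i ∈ pvIdx F nm ↔ 0 ≤ i ∧ i < (F.length : Int) ∧ nm ∈ PySem.List.pyGetD F i [] := by
  simp [pvIdx, List.mem_filter, PySem.List.mem_pyRange_one, and_assoc]

lemma pvSharedD_eq (F : List (List String)) :
    pvSharedD F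
      = ((pvIndexD F).items.flatMap (fun q => (pvPairsOf q.2).map (fun pr => (pr, q.1)))).foldl
          (fun d q => d.modify q.1 [] (fun l => l ++ [q.2])) PySem.Dict.empty := by
  unfold pvSharedD pvPairsOf
  simp only [List.foldl_flatMap, List.foldl_map]

lemma pvSharedD_getD (F : List (List String)) (p : Int × Int) :
    (pvSharedD F).getD p [] = pvSharedB F p := by
  rw [pvSharedD_eq, PySem.Dict.getD_foldl_modify_append]
  rw [show (PySem.Dict.empty : PySem.Dict (Int × Int) (List String)).getD p [] = [] from rfl]
  rw [List.nil_append, List.filter_flatMap]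
  have h1 : ∀ q : String × List Int, q ∈ (pvIndexD F).items →
      ((pvPairsOf q.2).map (fun pr => (pr, q.1))).filter (fun r => r.1 == p)
        = if p ∈ pairs2 (pvIdx F q.1) then [(p, q.1)] else [] := by
    intro q hq
    rw [pvIndexD_items] at hq
    obtain ⟨nm, hnm, he⟩ := List.mem_map.mp hq
    have h2a : q.2 = pvIdx F q.1 := by rw [← he]
    rw [h2a, pvPairsOf_eq_pairs2, List.filter_map]
    rw [show ((fun r : (Int × Int) × String => r.1 == p) ∘ fun pr : Int × Int => (pr, q.1))
          = fun pr : Int × Int => pr == p from rfl]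
    rw [List.filter_beq]
    by_cases h : p ∈ pairs2 (pvIdx F q.1)
    · rw [List.count_eq_one_of_mem (pvNodup_pairs2 _ (pvIdx_pairwise F q.1)) h]
      simp [h]
    · rw [List.count_eq_zero_of_not_mem h]
      simp [h]
  rw [List.flatMap_congr h1, List.map_flatMap]
  have h2 : ∀ q : String × List Int,
      ((if p ∈ pairs2 (pvIdx F q.1) then [(p, q.1)] else [] : List ((Int × Int) × String)).map (fun r => r.2))
        = (if p ∈ pairs2 (pvIdx F q.1) then [q.1] else []) := by
    intro q; split_ifs <;> rfl
  rw [List.flatMap_congr (fun q _ => h2 q)]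
  rw [pvIndexD_items, List.flatMap_map]
  rw [List.flatMap_congr (l := pvAllNames F)
        (g := fun nm => if p ∈ pairs2 (pvIdx F nm) then [nm] else []) (fun nm _ => rfl)]
  rw [pvFlatMapIf (pvAllNames F) (fun nm => p ∈ pairs2 (pvIdx F nm))]
  rfl


lemma pvMem_allPairs (n : Int) (p : Int × Int) :
    p ∈ pvAllPairs n ↔ (0 ≤ p.1 ∧ p.1 < n) ∧ (0 ≤ p.2 ∧ p.2 < n) := by
  unfold pvAllPairs
  simp only [List.mem_flatMap, List.mem_map, PySem.List.mem_pyRange_one]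
  constructor
  · rintro ⟨i, hi, j, hj, rfl⟩
    exact ⟨hi, hj⟩
  · rintro ⟨h1, h2⟩
    exact ⟨p.1, h1, p.2, h2, rfl⟩

lemma pvMem_ltPairs (n : Int) (p : Int × Int) :
    p ∈ pvLtPairs n ↔ 0 ≤ p.1 ∧ p.1 < p.2 ∧ p.2 < n := by
  unfold pvLtPairs
  simp only [List.mem_flatMap, List.mem_map, PySem.List.mem_pyRange_one]
  constructor
  · rintro ⟨i, hi, j, hj, rfl⟩
    exact ⟨hi.1, by omega, hj.2⟩
  · rintro ⟨h1, h2, h3⟩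
    exact ⟨p.1, ⟨h1, by omega⟩, p.2, ⟨by omega, h3⟩, rfl⟩

lemma pvAllPairs_pairwise (n : Int) : (pvAllPairs n).Pairwise pvLexLT := by
  unfold pvAllPairs
  have gen : ∀ is : List Int, is.Pairwise (· < ·) →
      (is.flatMap (fun i => (PySem.List.pyRange 0 n 1).map (fun j => (i, j)))).Pairwise pvLexLT := by
    intro is
    induction is with
    | nil => intro _; simp
    | cons a t ih =>
      intro h
      rcases List.pairwise_cons.mp h with ⟨ha, ht⟩
      rw [List.flatMap_cons, List.pairwise_append]
      refine ⟨?_, ih ht, ?_⟩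
      · refine List.Pairwise.map _ ?_ (PySem.List.pairwise_lt_pyRange_one 0 n)
        intro x y hxy
        exact Or.inr ⟨rfl, hxy⟩
      · intro x hx y hy
        obtain ⟨j, _, hxe⟩ := List.mem_map.mp hx
        obtain ⟨i', hi', hy2⟩ := List.mem_flatMap.mp hy
        obtain ⟨j', _, hye⟩ := List.mem_map.mp hy2
        rw [← hxe, ← hye]
        exact Or.inl (ha i' hi')
  exact gen _ (PySem.List.pairwise_lt_pyRange_one 0 n)

lemma pvInter_mem (F : List (List String)) (p : Int × Int) (x : String) :
    x ∈ pvInter F p ↔ x ∈ PySem.List.pyGetD F p.1 [] ∧ x ∈ PySem.List.pyGetD F p.2 [] := by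
  unfold pvInter
  rw [PySem.Set.mem_inter, PySem.Set.mem_ofList, PySem.Set.mem_ofList]

lemma pvInter_isEmpty_swap (F : List (List String)) (a b : Int) :
    (pvInter F (b, a)).isEmpty = (pvInter F (a, b)).isEmpty := by
  rw [Bool.eq_iff_iff, List.isEmpty_iff, List.isEmpty_iff,
      List.eq_nil_iff_forall_not_mem, List.eq_nil_iff_forall_not_mem]
  constructor
  · intro h x hx
    obtain ⟨h1, h2⟩ := (pvInter_mem F (a, b) x).mp hx
    exact h x ((pvInter_mem F (b, a) x).mpr ⟨h2, h1⟩)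
  · intro h x hx
    obtain ⟨h1, h2⟩ := (pvInter_mem F (b, a) x).mp hx
    exact h x ((pvInter_mem F (a, b) x).mpr ⟨h2, h1⟩)

lemma pvRange_filter (n i : Int) (h0 : 0 ≤ i) :
    (PySem.List.pyRange 0 n 1).filter (fun j => decide (i < j)) = PySem.List.pyRange (i + 1) n 1 := by
  by_cases hn : i + 1 ≤ n
  · rw [PySem.List.pyRange_one_append 0 (i + 1) n (by omega) hn, List.filter_append]
    have hnil : (PySem.List.pyRange 0 (i + 1) 1).filter (fun j => decide (i < j)) = [] := by
      rw [List.filter_eq_nil_iff]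
      intro j hj
      rw [PySem.List.mem_pyRange_one] at hj
      simp only [decide_eq_true_eq]
      omega
    have hall : (PySem.List.pyRange (i + 1) n 1).filter (fun j => decide (i < j))
        = PySem.List.pyRange (i + 1) n 1 := by
      rw [List.filter_eq_self]
      intro j hj
      rw [PySem.List.mem_pyRange_one] at hj
      simp only [decide_eq_true_eq]
      omega
    rw [hnil, hall, List.nil_append]
  · rw [PySem.List.pyRange_one_eq_nil (show n ≤ i + 1 by omega),
        List.filter_eq_nil_iff.mpr ?_]
    intro j hj
    rw [PySem.List.mem_pyRange_one] at hj
    simp only [decide_eq_true_eq]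
    omega

lemma pvLtPairs_eq (n : Int) :
    pvLtPairs n = (pvAllPairs n).filter (fun p => decide (p.1 < p.2)) := by
  unfold pvLtPairs pvAllPairs
  rw [List.filter_flatMap]
  apply List.flatMap_congr
  intro i hi
  rw [PySem.List.mem_pyRange_one] at hi
  rw [List.filter_map]
  rw [show ((fun p : Int × Int => decide (p.1 < p.2)) ∘ fun j : Int => (i, j))
        = fun j : Int => decide (i < j) from rfl]
  rw [pvRange_filter n i hi.1]

lemma pvPA_lt_eq (F : List (List String)) :
    (((pvAllPairs ((F.length : Int))).filter
        (fun p => (!(p.1 == p.2)) && !(pvInter F p).isEmpty)).filter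
      (fun p => decide (p.1 < p.2))) = pvP F := by
  rw [List.filter_filter]
  unfold pvP
  rw [pvLtPairs_eq, List.filter_filter]
  apply List.filter_congr
  intro p _
  rw [Bool.eq_iff_iff]
  simp only [Bool.and_eq_true, Bool.not_eq_true', decide_eq_true_eq, beq_eq_false_iff_ne,
    List.isEmpty_eq_false_iff, ne_eq]
  constructor
  · rintro ⟨hlt, _, hne⟩
    exact ⟨hne, hlt⟩
  · rintro ⟨hne, hlt⟩
    exact ⟨hlt, by omega, hne⟩

lemma pvA_filtered (mls : List (List String)) (cl : List String) :
    super_names mls cl = PySem.Str.strip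
      (((pvP (pvFirsts mls)).foldl (pvStepS cl (pvFirsts mls)) (([] : List (PySem.Set String)), "")).2) := by
  rw [pvA_fold]
  have hmir : ∀ l1 p l2,
      (pvAllPairs (((pvFirsts mls).length : Int))).filter
          (fun p => (!(p.1 == p.2)) && !(pvInter (pvFirsts mls) p).isEmpty) = l1 ++ p :: l2 →
      p.2 < p.1 →
      pvSeen (([] : List (PySem.Set String)) : List (PySem.Set String)) (pvPairSet cl p) = true ∨ (p.2, p.1) ∈ l1 := by
    intro l1 p l2 heq hplt
    right
    have hpmem : p ∈ (pvAllPairs (((pvFirsts mls).length : Int))).filter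
        (fun p => (!(p.1 == p.2)) && !(pvInter (pvFirsts mls) p).isEmpty) := by
      rw [heq]
      exact List.mem_append_right _ (List.mem_cons_self)
    have hpA := List.of_mem_filter hpmem
    rw [Bool.and_eq_true] at hpA
    have hpAll := List.mem_of_mem_filter hpmem
    rw [pvMem_allPairs] at hpAll
    have hm : (p.2, p.1) ∈ (pvAllPairs (((pvFirsts mls).length : Int))).filter
        (fun p => (!(p.1 == p.2)) && !(pvInter (pvFirsts mls) p).isEmpty) := by
      rw [List.mem_filter]
      constructor
      · rw [pvMem_allPairs]
        exact ⟨hpAll.2, hpAll.1⟩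
      · rw [Bool.and_eq_true]
        constructor
        · simp only [Bool.not_eq_true', beq_eq_false_iff_ne, ne_eq]
          omega
        · rw [show ((p.2, p.1) : Int × Int) = ((p.2 : Int), (p.1 : Int)) from rfl]
          rw [show (pvInter (pvFirsts mls) (p.2, p.1)).isEmpty
                = (pvInter (pvFirsts mls) (p.1, p.2)).isEmpty from pvInter_isEmpty_swap _ _ _]
          have : ((p.1, p.2) : Int × Int) = p := rfl
          rw [this]
          exact hpA.2
    have hpw : ((pvAllPairs (((pvFirsts mls).length : Int))).filter
        (fun p => (!(p.1 == p.2)) && !(pvInter (pvFirsts mls) p).isEmpty)).Pairwise pvLexLT :=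
      (pvAllPairs_pairwise _).filter _
    rw [heq] at hpw hm
    rcases List.mem_append.mp hm with h | h
    · exact h
    · exfalso
      rcases List.mem_cons.mp h with he | he
      · have h1 : p.2 = p.1 := by have := congrArg Prod.fst he; simpa using this
        omega
      · have hlex : pvLexLT p (p.2, p.1) :=
          (List.pairwise_cons.mp (List.pairwise_append.mp hpw).2.1).1 _ he
        rcases hlex with h' | ⟨h', h''⟩ <;> simp at h' <;> omega
  rw [pvDropMirrors cl (pvFirsts mls) _ _
      (fun p hp => by
        have := List.of_mem_filter hp
        rw [Bool.and_eq_true] at this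
        have h1 := this.1
        simp only [Bool.not_eq_true', beq_eq_false_iff_ne, ne_eq] at h1
        exact h1)
      hmir]
  rw [pvPA_lt_eq]

lemma pvSharedB_perm (F : List (List String)) (p : Int × Int)
    (h0 : 0 ≤ p.1) (hlt : p.1 < p.2) (hn : p.2 < (F.length : Int)) :
    (pvSharedB F p).Perm (pvInter F p) := by
  apply (List.perm_ext_iff_of_nodup ?_ ?_).mpr
  · intro nm
    unfold pvSharedB
    rw [List.mem_filter, decide_eq_true_eq]
    constructor
    · rintro ⟨_, hmem⟩
      obtain ⟨h1, h2, _⟩ :=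
        (pvMem_pairs2 (pvIdx F nm) (pvIdx_pairwise F nm) p.1 p.2).mp hmem
      exact (pvInter_mem F p nm).mpr
        ⟨((pvMem_pvIdx F nm p.1).mp h1).2.2, ((pvMem_pvIdx F nm p.2).mp h2).2.2⟩
    · intro hin
      obtain ⟨hm1, hm2⟩ := (pvInter_mem F p nm).mp hin
      refine ⟨?_, ?_⟩
      · unfold pvAllNames
        rw [PySem.Set.mem_ofList, List.mem_flatMap]
        refine ⟨PySem.List.pyGetD F p.1 [], ?_, (PySem.List.mem_dedup _ _).mpr hm1⟩
        rw [PySem.List.pyGetD_eq_getElem F [] h0 (by omega)]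
        exact List.getElem_mem _
      · exact (pvMem_pairs2 (pvIdx F nm) (pvIdx_pairwise F nm) p.1 p.2).mpr
          ⟨(pvMem_pvIdx F nm p.1).mpr ⟨h0, by omega, hm1⟩,
           (pvMem_pvIdx F nm p.2).mpr ⟨by omega, hn, hm2⟩, hlt⟩
  · exact List.Nodup.filter _ (PySem.Set.nodup_ofList _)
  · exact PySem.Set.nodup_inter _ _ (PySem.Set.nodup_ofList _)

lemma pvSharedB_sorted_eq (F : List (List String)) (p : Int × Int)
    (h0 : 0 ≤ p.1) (hlt : p.1 < p.2) (hn : p.2 < (F.length : Int)) :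
    PySem.List.sorted (pvSharedB F p) (fun x => x) false
      = PySem.List.sorted (pvInter F p) (fun x => x) false :=
  PySem.List.sorted_eq_sorted_of_perm _ _ _ (fun _ _ h => h) (pvSharedB_perm F p h0 hlt hn)

lemma pvSharedB_isEmpty_eq (F : List (List String)) (p : Int × Int)
    (h0 : 0 ≤ p.1) (hlt : p.1 < p.2) (hn : p.2 < (F.length : Int)) :
    (pvSharedB F p).isEmpty = (pvInter F p).isEmpty := by
  have hp := pvSharedB_perm F p h0 hlt hn
  rw [Bool.eq_iff_iff, List.isEmpty_iff, List.isEmpty_iff]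
  constructor
  · intro h
    apply List.eq_nil_of_length_eq_zero
    rw [← hp.length_eq, h]
    rfl
  · intro h
    apply List.eq_nil_of_length_eq_zero
    rw [hp.length_eq, h]
    rfl

lemma pvB_fold (mls : List (List String)) (cl : List String) :
    super_names_alt mls cl = PySem.Str.join "\n"
      (((pvP (pvFirsts mls)).foldl (pvStepL cl (pvFirsts mls))
          (([] : List (PySem.Set String)), ([] : List String))).2) := by
  rw [pvB_flat]
  refine congrArg _ (congrArg Prod.snd ?_)
  have h1 : ∀ (st : List (PySem.Set String) × List String) (p : Int × Int),
      p ∈ pvLtPairs (((pvFirsts mls).length : Int)) →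
      (if ((pvSharedD (pvFirsts mls)).getD p []).isEmpty then st
       else
         (if pvSeen st.1 (pvPairSet cl p) then st
          else (st.1 ++ [pvPairSet cl p],
            st.2 ++ ["На курсах '" ++ pvC cl p.1 ++ "' и '" ++ pvC cl p.2 ++ "' преподают: "
              ++ PySem.Str.join ", " (PySem.List.sorted ((pvSharedD (pvFirsts mls)).getD p []) (fun x => x) false)])))
        = if (!(pvSharedB (pvFirsts mls) p).isEmpty) = true then
            (if pvSeen st.1 (pvPairSet cl p) then st
             else (st.1 ++ [pvPairSet cl p],
               st.2 ++ ["На курсах '" ++ pvC cl p.1 ++ "' и '" ++ pvC cl p.2 ++ "' преподают: "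
                 ++ PySem.Str.join ", " (PySem.List.sorted (pvSharedB (pvFirsts mls) p) (fun x => x) false)]))
          else st := by
    intro st p _
    rw [pvSharedD_getD]
    by_cases h : (pvSharedB (pvFirsts mls) p).isEmpty = true
    · simp [h]
    · simp [h]
  rw [PySem.List.foldl_congr_mem _ _ _ _ h1]
  rw [PySem.List.foldl_if_eq_foldl_filter]
  have hfil : (pvLtPairs (((pvFirsts mls).length : Int))).filter
      (fun p => !(pvSharedB (pvFirsts mls) p).isEmpty) = pvP (pvFirsts mls) := by
    unfold pvP
    apply List.filter_congr
    intro p hp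
    rw [pvMem_ltPairs] at hp
    rw [pvSharedB_isEmpty_eq (pvFirsts mls) p hp.1 hp.2.1 hp.2.2]
  rw [hfil]
  refine PySem.List.foldl_congr_mem _ _ _ _ ?_
  intro st p hp
  have hr := (pvMem_ltPairs _ p).mp (List.mem_of_mem_filter hp)
  unfold pvStepL pvLine
  rw [pvSharedB_sorted_eq (pvFirsts mls) p hr.1 hr.2.1 hr.2.2]

lemma pvHeadD_mem {α : Type} (l : List α) (d : α) (h : l ≠ []) : l.headD d ∈ l := by
  cases l with
  | nil => exact absurd rfl h
  | cons a t => exact List.mem_cons_self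

lemma pvSplitGo_good : ∀ (s cur : List Char) (acc : List (List Char)),
    (∀ t ∈ acc, t ≠ [] ∧ ∀ c ∈ t, PySem.Chars.isspace c = false) →
    (∀ c ∈ cur, PySem.Chars.isspace c = false) →
    ∀ t ∈ PySem.Chars.split₀.go s cur acc, t ≠ [] ∧ ∀ c ∈ t, PySem.Chars.isspace c = false := by
  intro s
  induction s with
  | nil =>
    intro cur acc hacc hcur t ht
    have hgo : PySem.Chars.split₀.go [] cur acc
        = if cur.isEmpty then acc.reverse else (cur.reverse :: acc).reverse := rfl
    rw [hgo] at ht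
    split_ifs at ht with hce
    · exact hacc t (List.mem_reverse.mp ht)
    · rcases List.mem_cons.mp (List.mem_reverse.mp ht) with he | he
      · subst he
        constructor
        · simp only [ne_eq, List.reverse_eq_nil_iff]
          exact fun h => by rw [h] at hce; exact hce rfl
        · intro c hc
          exact hcur c (List.mem_reverse.mp hc)
      · exact hacc t he
  | cons c rest ih =>
    intro cur acc hacc hcur t ht
    have hgo : PySem.Chars.split₀.go (c :: rest) cur acc
        = if PySem.Chars.isspace c then
            (if cur.isEmpty then PySem.Chars.split₀.go rest [] acc
             else PySem.Chars.split₀.go rest [] (cur.reverse :: acc))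
          else PySem.Chars.split₀.go rest (c :: cur) acc := rfl
    rw [hgo] at ht
    split_ifs at ht with hs hce
    · exact ih [] acc hacc (fun c' hc' => absurd hc' (List.not_mem_nil)) t ht
    · refine ih [] (cur.reverse :: acc) ?_ (fun c' hc' => absurd hc' (List.not_mem_nil)) t ht
      intro t' ht'
      rcases List.mem_cons.mp ht' with he | he
      · subst he
        constructor
        · simp only [ne_eq, List.reverse_eq_nil_iff]
          exact fun h => by rw [h] at hce; exact hce rfl
        · intro c' hc'
          exact hcur c' (List.mem_reverse.mp hc')
      · exact hacc t' he
    · refine ih (c :: cur) acc hacc ?_ t ht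
      intro c' hc'
      rcases List.mem_cons.mp hc' with he | he
      · subst he
        simpa using hs
      · exact hcur c' he

lemma pvTokens_good (name t : String) (ht : t ∈ PySem.Str.split₀ name) :
    t.toList ≠ [] ∧ ∀ c ∈ t.toList, PySem.Chars.isspace c = false := by
  have hmem : t.toList ∈ PySem.Chars.split₀ name.toList := by
    rw [← PySem.Str.split₀_map_toList]
    exact List.mem_map_of_mem ht
  have hgo : PySem.Chars.split₀ name.toList = PySem.Chars.split₀.go name.toList [] [] := rfl
  rw [hgo] at hmem
  exact pvSplitGo_good name.toList [] []
    (fun t' ht' => absurd ht' (List.not_mem_nil))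
    (fun c hc => absurd hc (List.not_mem_nil)) t.toList hmem

lemma pvGoodLast (t : List Char) (h : t ≠ []) (hall : ∀ c ∈ t, PySem.Chars.isspace c = false) :
    ∃ d, t.getLast? = some d ∧ PySem.Chars.isspace d = false := by
  cases hg : t.getLast? with
  | none => exact absurd (List.getLast?_eq_none_iff.mp hg) h
  | some d => exact ⟨d, rfl, hall d (List.mem_of_getLast? hg)⟩

lemma pvJoinLast (sep : List Char) : ∀ (parts : List (List Char)), parts ≠ [] →
    (∀ t ∈ parts, ∃ d, t.getLast? = some d ∧ PySem.Chars.isspace d = false) →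
    ∃ d, (PySem.Chars.join sep parts).getLast? = some d ∧ PySem.Chars.isspace d = false := by
  intro parts
  induction parts with
  | nil => intro h; exact absurd rfl h
  | cons a rest ih =>
    intro _ hg
    cases rest with
    | nil =>
      rw [PySem.Chars.join_singleton]
      exact hg a List.mem_cons_self
    | cons b rest' =>
      rw [PySem.Chars.join_cons_cons]
      obtain ⟨d, hd, hds⟩ := ih (by simp) (fun t ht => hg t (List.mem_cons_of_mem a ht))
      refine ⟨d, ?_, hds⟩
      rw [List.getLast?_append, hd]
      rfl

lemma pvConcatNL_toList : ∀ (l0 : String) (rest : List String),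
    (pvConcatNL (l0 :: rest)).toList
      = PySem.Chars.join ['\n'] ((l0 :: rest).map String.toList) ++ ['\n'] := by
  intro l0 rest
  induction rest generalizing l0 with
  | nil =>
    show (l0 ++ "\n" ++ pvConcatNL []).toList = _
    rw [List.map_cons, List.map_nil, PySem.Chars.join_singleton]
    rw [String.toList_append, String.toList_append]
    rw [show ("\n" : String).toList = ['\n'] from rfl,
        show (pvConcatNL []).toList = [] from rfl, List.append_nil]
  | cons l1 rest ih =>
    show (l0 ++ "\n" ++ pvConcatNL (l1 :: rest)).toList = _
    rw [String.toList_append, String.toList_append, ih l1]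
    simp only [List.map_cons]
    rw [PySem.Chars.join_cons_cons]
    rw [show ("\n" : String).toList = ['\n'] from rfl]
    simp [List.append_assoc]

lemma pvStripAppend (X : List Char)
    (hh : ∃ c, X.head? = some c ∧ PySem.Chars.isspace c = false)
    (hl : ∃ c, X.getLast? = some c ∧ PySem.Chars.isspace c = false) :
    PySem.Chars.strip (X ++ ['\n']) = X := by
  obtain ⟨c, hc, hcs⟩ := hh
  obtain ⟨d, hd, hds⟩ := hl
  cases X with
  | nil => simp at hc
  | cons c0 X' =>
    have hcs0 : PySem.Chars.isspace c0 = false := by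
      have he : c0 = c := by simpa using hc
      rw [he]; exact hcs
    show PySem.Chars.rstrip (PySem.Chars.lstrip ((c0 :: X') ++ ['\n'])) = c0 :: X'
    have hls : PySem.Chars.lstrip ((c0 :: X') ++ ['\n']) = (c0 :: X') ++ ['\n'] := by
      show List.dropWhile PySem.Chars.isspace ((c0 :: X') ++ ['\n']) = (c0 :: X') ++ ['\n']
      rw [List.cons_append, List.dropWhile_cons, hcs0]
      rfl
    rw [hls]
    show (List.dropWhile PySem.Chars.isspace ((c0 :: X') ++ ['\n']).reverse).reverse = c0 :: X'
    rw [List.reverse_append]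
    rw [show (['\n'] : List Char).reverse = ['\n'] from rfl, List.singleton_append]
    rw [List.dropWhile_cons]
    rw [show PySem.Chars.isspace '\n' = true from by decide]
    simp only [if_true]
    cases hR : (c0 :: X').reverse with
    | nil => exact absurd hR (by simp)
    | cons d0 R' =>
      have hd0 : d0 = d := by
        have := List.getLast?_eq_head?_reverse (xs := c0 :: X')
        rw [hd, hR] at this
        simpa using this.symm
      subst hd0
      rw [List.dropWhile_cons, hds]
      simp only [Bool.false_eq_true, if_false]
      rw [← hR, List.reverse_reverse]

lemma pvStrip_concat (lines : List String)
    (h : ∀ l ∈ lines,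
        (∃ c, l.toList.head? = some c ∧ PySem.Chars.isspace c = false) ∧
        (∃ c, l.toList.getLast? = some c ∧ PySem.Chars.isspace c = false)) :
    PySem.Str.strip (pvConcatNL lines) = PySem.Str.join "\n" lines := by
  apply String.toList_inj.mp
  rw [PySem.Str.toList_strip, PySem.Str.toList_join]
  cases lines with
  | nil => rfl
  | cons l0 rest =>
    rw [pvConcatNL_toList l0 rest]
    rw [show ("\n" : String).toList = ['\n'] from rfl]
    apply pvStripAppend
    · obtain ⟨⟨c, hc, hcs⟩, _⟩ := h l0 List.mem_cons_self
      refine ⟨c, ?_, hcs⟩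
      cases rest with
      | nil =>
        rw [List.map_cons, List.map_nil, PySem.Chars.join_singleton]
        exact hc
      | cons l1 rest' =>
        rw [List.map_cons, List.map_cons, PySem.Chars.join_cons_cons]
        rw [List.head?_append, List.head?_append, hc]
        rfl
    · apply pvJoinLast
      · simp
      · intro t ht
        obtain ⟨l, hl, rfl⟩ := List.mem_map.mp ht
        exact (h l hl).2

lemma pvLine_good (mls : List (List String)) (cl : List String)
    (hsplit : ∀ m ∈ mls, ∀ name ∈ m, PySem.Str.split₀ name ≠ []) (p : Int × Int)
    (hp : p ∈ pvP (pvFirsts mls)) :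
    (∃ c, (pvLine cl (pvFirsts mls) p).toList.head? = some c ∧ PySem.Chars.isspace c = false) ∧
    (∃ c, (pvLine cl (pvFirsts mls) p).toList.getLast? = some c ∧ PySem.Chars.isspace c = false) := by
  have hlt := (pvMem_ltPairs _ p).mp (List.mem_of_mem_filter hp)
  have hne : pvInter (pvFirsts mls) p ≠ [] := by
    have := List.of_mem_filter hp
    simpa using this
  have hparts : ∀ t ∈ PySem.List.sorted (pvInter (pvFirsts mls) p) (fun x => x) false,
      t.toList ≠ [] ∧ ∀ c ∈ t.toList, PySem.Chars.isspace c = false := by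
    intro t ht
    rw [PySem.List.mem_sorted] at ht
    have hm1 := ((pvInter_mem (pvFirsts mls) p t).mp ht).1
    rw [PySem.List.pyGetD_eq_getElem (pvFirsts mls) [] hlt.1 (by
      have h1 := hlt.2.1; have h2 := hlt.2.2; omega)] at hm1
    simp only [pvFirsts, List.getElem_map] at hm1
    obtain ⟨name, hname, htok⟩ := List.mem_map.mp hm1
    have hsp := hsplit _ (List.getElem_mem _) name hname
    have htmem : t ∈ PySem.Str.split₀ name := by
      rw [← htok]
      exact pvHeadD_mem _ "" hsp
    exact pvTokens_good name t htmem
  constructor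
  · refine ⟨'Н', ?_, by decide⟩
    unfold pvLine
    simp only [String.toList_append, List.head?_append]
    rw [show ("На курсах '".toList).head? = some 'Н' from by decide]
    rfl
  · have hsne : (PySem.List.sorted (pvInter (pvFirsts mls) p) (fun x => x) false) ≠ [] := by
      rw [ne_eq, PySem.List.sorted_eq_nil_iff]
      exact hne
    obtain ⟨d, hd, hds⟩ := pvJoinLast [',', ' ']
      ((PySem.List.sorted (pvInter (pvFirsts mls) p) (fun x => x) false).map String.toList)
      (by simpa using hsne)
      (by
        intro t ht
        obtain ⟨l, hl, rfl⟩ := List.mem_map.mp ht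
        obtain ⟨h1, h2⟩ := hparts l hl
        exact pvGoodLast l.toList h1 h2)
    refine ⟨d, ?_, hds⟩
    unfold pvLine
    simp only [String.toList_append, List.getLast?_append]
    rw [show (PySem.Str.join ", " (PySem.List.sorted (pvInter (pvFirsts mls) p) (fun x => x) false)).toList
          = PySem.Chars.join [',', ' ']
              ((PySem.List.sorted (pvInter (pvFirsts mls) p) (fun x => x) false).map String.toList) from by
        rw [PySem.Str.toList_join]; rfl]
    rw [hd]
    rfl

-- ===== VERDICT (by name: the statement is the Claim_ definition above) =====
theorem super_names_spec : Claim_equal_super_names := by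
  intro mls cl _ hpre
  show super_names mls cl = super_names_alt mls cl
  rw [pvA_filtered, pvB_fold]
  rw [pvFoldS_eq cl (pvFirsts mls) (pvP (pvFirsts mls)) [] ""]
  simp only [String.empty_append]
  apply pvStrip_concat
  intro l hl
  rcases pvMem_foldL cl (pvFirsts mls) _ [] [] l hl with h | ⟨p, hp, rfl⟩
  · cases h
  · exact pvLine_good mls cl hpre.1 p hp
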